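-- pv_equiv track=rewrite | github.com/terylt/mcp-context-forge | mcp-servers/python/pm_mcp_server/src/pm_mcp_server/tools/reporting.py | lessons_learned_catalog
-- ===== SOURCE A (Python) =====
-- from collections import defaultdict
--
-- def lessons_learned_catalog(entries: list[dict[str, str]]) -> dict[str, list[str]]:
--     """Group retrospectives by theme."""
--
--     catalog: dict[str, list[str]] = defaultdict(list)
--     for entry in entries:
--         theme = entry.get("theme", "general")
--         insight = entry.get("insight", "")
--         if insight:
--             catalog[theme].append(insight)
--     return {theme: items for theme, items in catalog.items()}
-- ===== SOURCE B (Python) =====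
-- def lessons_learned_catalog(entries: list[dict[str, str]]) -> dict[str, list[str]]:
--     """Group retrospectives by theme (filter-then-group, no mutable accumulator)."""
--     pairs = [(e.get("theme", "general"), e.get("insight", "")) for e in entries]
--     pairs = [(t, i) for t, i in pairs if i]
--     themes = dict.fromkeys(t for t, _ in pairs)
--     return {t: [i for tt, i in pairs if tt == t] for t in themes}
-- ===== Notes on version B (the rewrite author's own statement) =====
-- stated objective: alternative
-- what changed: Replaces the single-pass defaultdict accumulation with a filter-then-group pipeline: project entries to (theme, insight) pairs, drop empty insights, dedupe themes with dict.fromkeys, then build each theme's list by a per-theme scan of the pair list.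
import Mathlib
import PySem

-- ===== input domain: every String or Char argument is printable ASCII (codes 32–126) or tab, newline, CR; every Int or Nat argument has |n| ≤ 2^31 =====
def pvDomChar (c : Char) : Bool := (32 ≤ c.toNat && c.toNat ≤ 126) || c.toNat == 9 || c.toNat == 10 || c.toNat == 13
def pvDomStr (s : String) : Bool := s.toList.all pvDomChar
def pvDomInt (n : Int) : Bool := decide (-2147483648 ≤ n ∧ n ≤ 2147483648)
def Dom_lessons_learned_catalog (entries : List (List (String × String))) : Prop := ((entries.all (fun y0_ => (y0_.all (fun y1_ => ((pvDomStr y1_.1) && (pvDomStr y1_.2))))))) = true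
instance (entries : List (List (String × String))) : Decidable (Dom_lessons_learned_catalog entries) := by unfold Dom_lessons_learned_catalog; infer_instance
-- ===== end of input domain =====

-- B replaces A's single-pass defaultdict accumulation by a filter-then-group pipeline
-- (project to pairs, drop empty insights, dedupe themes, per-theme scan); same return value.

-- ===== PORT A =====
def lessons_learned_catalog (entries : List (List (String × String))) : List (String × List String) :=
  -- catalog = defaultdict(list); for entry in entries: … catalog[theme].append(insight)
  let catalog : PySem.Dict String (List String) :=
    entries.foldl (fun catalog entry =>
      let theme := PySem.Dict.getD ⟨entry⟩ "theme" "general"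
      let insight := PySem.Dict.getD ⟨entry⟩ "insight" ""
      if insight ≠ "" then catalog.modify theme [] (fun xs => xs ++ [insight]) else catalog)
      PySem.Dict.empty
  -- {theme: items for theme, items in catalog.items()}
  catalog.items.map (fun p => (p.1, p.2))

-- ===== PORT B =====
def lessons_learned_catalog_alt (entries : List (List (String × String))) : List (String × List String) :=
  let pairs0 := entries.map (fun e =>
    (PySem.Dict.getD ⟨e⟩ "theme" "general", PySem.Dict.getD ⟨e⟩ "insight" ""))
  let pairs := pairs0.filter (fun p => p.2 != "")
  let themes := PySem.List.dedup (pairs.map Prod.fst)        -- dict.fromkeys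
  themes.map (fun t => (t, (pairs.filter (fun p => p.1 == t)).map Prod.snd))

-- ===== PRECONDITION & SPEC =====
def Spec_lessons_learned_catalog (entries : List (List (String × String))) (out : List (String × List String)) : Prop := out = lessons_learned_catalog_alt entries
instance (entries : List (List (String × String))) (out : List (String × List String)) : Decidable (Spec_lessons_learned_catalog entries out) := by unfold Spec_lessons_learned_catalog; infer_instance

-- ===== CLAIM (what is proved, stated in full; the proofs are below) =====
def Claim_equal_lessons_learned_catalog : Prop := ∀ (entries : List (List (String × String))), Dom_lessons_learned_catalog entries → Spec_lessons_learned_catalog entries (lessons_learned_catalog entries)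

-- ===== LEMMAS AND PROOFS =====

-- A's fold (which skips empty insights inside the loop) equals the plain append-fold over B's filtered pair list.
theorem foldA_eq_foldl_pairs (entries : List (List (String × String)))
    (d : PySem.Dict String (List String)) :
    entries.foldl (fun catalog entry =>
      let theme := PySem.Dict.getD ⟨entry⟩ "theme" "general"
      let insight := PySem.Dict.getD ⟨entry⟩ "insight" ""
      if insight ≠ "" then catalog.modify theme [] (fun xs => xs ++ [insight]) else catalog) d
    = ((entries.map (fun e =>
          (PySem.Dict.getD ⟨e⟩ "theme" "general", PySem.Dict.getD ⟨e⟩ "insight" ""))).filter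
            (fun p => p.2 != "")).foldl
        (fun d p => d.modify p.1 [] (fun xs => xs ++ [p.2])) d := by
  induction entries generalizing d with
  | nil => rfl
  | cons e es ih =>
    by_cases h : PySem.Dict.getD (⟨e⟩ : PySem.Dict String String) "insight" "" = ""
    · simpa [List.filter_cons, h] using ih d
    · simpa [List.filter_cons, h] using
        ih (d.modify (PySem.Dict.getD ⟨e⟩ "theme" "general") []
          (fun xs => xs ++ [PySem.Dict.getD (⟨e⟩ : PySem.Dict String String) "insight" ""]))

theorem lessons_learned_catalog_eq_alt (entries : List (List (String × String))) :
    lessons_learned_catalog entries = lessons_learned_catalog_alt entries := by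
  unfold lessons_learned_catalog lessons_learned_catalog_alt
  dsimp only
  rw [foldA_eq_foldl_pairs]
  set pairs := ((entries.map (fun e =>
      (PySem.Dict.getD ⟨e⟩ "theme" "general", PySem.Dict.getD ⟨e⟩ "insight" ""))).filter
        (fun p => p.2 != "")) with hpairs
  set F := pairs.foldl (fun d p => d.modify p.1 [] (fun xs => xs ++ [p.2]))
    (PySem.Dict.empty : PySem.Dict String (List String)) with hF
  have hnd : F.keys.Nodup := by
    rw [hF]
    exact PySem.Dict.nodup_keys_foldl_modify_key pairs Prod.fst []
      (fun _ p xs => xs ++ [p.2]) PySem.Dict.empty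
      (by simp)
  have hkeys : F.keys = PySem.List.dedup (pairs.map Prod.fst) := by
    rw [hF]
    rw [PySem.Dict.keys_foldl_modify_key pairs Prod.fst []
      (fun _ p xs => xs ++ [p.2]) PySem.Dict.empty]
    simp [PySem.Dict.keys_empty, PySem.Set.update_nil_left]
  have hitems := PySem.Dict.items_eq_map_keys F hnd []
  rw [hitems, hkeys]
  rw [List.map_map]
  apply List.map_congr_left
  intro t _
  have hget : F.getD t [] = (pairs.filter (fun p => p.1 == t)).map Prod.snd := by
    rw [hF, PySem.Dict.getD_foldl_modify_append pairs PySem.Dict.empty t]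
    simp [PySem.Dict.getD_empty]
  simp [Function.comp, hget]

-- ===== VERDICT (by name: the statement is the Claim_ definition above) =====
theorem lessons_learned_catalog_spec : Claim_equal_lessons_learned_catalog := by
  intro entries _
  unfold Spec_lessons_learned_catalog
  exact lessons_learned_catalog_eq_alt entries
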